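-- pv_equiv track=rewrite | github.com/GerardTromp/cde-clustering | cde_analyzer/logic/extractor.py | prune_subphrases_by_tinyid
-- ===== SOURCE A (Python) =====
-- from collections import defaultdict
-- from typing import Any, Dict, List, Set, Optional, DefaultDict
--
-- def prune_subphrases_by_tinyid(phrase_map: Dict[str, Set[str]]) -> Dict[str, Set[str]]:
--     """
--     Collapse shorter subphrases per tinyID if the same ID also matches a longer phrase.
--     Retains only the longest (non-sub)phrases for each ID.
--     """
--     # Reverse index: tinyID -> all phrases it appears in
--     tinyid_to_phrases = defaultdict(list)
--     for phrase, ids in phrase_map.items():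
--         for tid in ids:
--             tinyid_to_phrases[tid].append(phrase)
--
--     # For each ID, keep only longest phrases (by word count) that aren't substrings of others
--     longest_phrases_per_tid = defaultdict(set)
--     for tid, phrases in tinyid_to_phrases.items():
--         # Sort by word length descending, then lexically
--         sorted_phrases = sorted(phrases, key=lambda p: (-len(p.split()), p))
--         kept = set()
--         for p in sorted_phrases:
--             if not any(p in longer and p != longer for longer in kept):
--                 kept.add(p)
--         for p in kept:
--             longest_phrases_per_tid[p].add(tid)
--
--     # Rebuild collapsed phrase map
--     collapsed_map: Dict[str, Set[str]] = defaultdict(set)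
--     for phrase, ids in longest_phrases_per_tid.items():
--         collapsed_map[phrase].update(ids)
--
--     return collapsed_map
-- ===== SOURCE B (Python) =====
-- def prune_subphrases_by_tinyid(phrase_map):
--     """
--     Collapse shorter subphrases per tinyID: keep, for each tinyID, exactly the
--     phrases that are not proper substrings of a phrase of that ID with a smaller
--     sort key, written straight into the result dict in one pass.
--     """
--     def key(p):
--         return (-len(p.split()), p)
--
--     tid_phrases = {}
--     for phrase, ids in phrase_map.items():
--         for tid in ids:
--             tid_phrases.setdefault(tid, []).append(phrase)
--
--     collapsed = {}
--     for tid, phrases in tid_phrases.items():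
--         keyed = [(key(q), q) for q in phrases]
--         for p in sorted(phrases, key=key):
--             kp = key(p)
--             if not any(kq < kp and p in q for kq, q in keyed):
--                 collapsed.setdefault(p, set()).add(tid)
--     return collapsed
-- ===== Notes on version B (the rewrite author's own statement) =====
-- stated objective: simpler
-- what changed: Replaces A's sequential greedy kept-set (each phrase tested against the previously kept ones) and its two intermediate dicts (longest_phrases_per_tid plus a rebuild pass) by a direct characterisation: a phrase is kept for a tinyID iff it is not a proper substring of any phrase of that ID with a smaller sort key, written straight into the result dict in one pass.
import Mathlib
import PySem

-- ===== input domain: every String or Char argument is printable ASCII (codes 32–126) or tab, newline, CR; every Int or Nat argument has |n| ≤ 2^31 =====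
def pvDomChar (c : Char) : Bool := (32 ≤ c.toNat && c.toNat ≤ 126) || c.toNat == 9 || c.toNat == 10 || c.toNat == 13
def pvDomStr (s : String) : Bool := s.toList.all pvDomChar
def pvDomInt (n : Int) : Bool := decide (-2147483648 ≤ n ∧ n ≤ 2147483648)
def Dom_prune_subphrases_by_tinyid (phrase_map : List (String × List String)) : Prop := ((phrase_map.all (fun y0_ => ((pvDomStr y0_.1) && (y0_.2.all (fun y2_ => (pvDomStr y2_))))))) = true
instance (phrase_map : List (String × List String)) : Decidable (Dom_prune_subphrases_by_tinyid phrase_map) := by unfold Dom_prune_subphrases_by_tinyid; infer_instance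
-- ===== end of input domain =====

-- B replaces A's sequential greedy kept-set and its two intermediate dicts by a direct
-- one-pass filter per tinyID (keep a phrase iff no phrase of that ID with a smaller sort
-- key properly contains it); objective: simpler.  Return value only (no argument mutation).

-- ===== PORT A =====
-- len(p.split()) as an Int (the sort-key word count; both Pythons compute it the same way)
def pvWords (p : String) : Int := ((PySem.Str.split₀ p).length : Int)

def prune_subphrases_by_tinyid (phrase_map : List (String × List String)) : List (String × List String) :=
  let tinyid_to_phrases : PySem.Dict String (List String) :=
    phrase_map.foldl (fun d pr => pr.2.foldl (fun d tid => d.modify tid [] (fun l => l ++ [pr.1])) d) PySem.Dict.empty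
  let longest : PySem.Dict String (PySem.Set String) :=
    tinyid_to_phrases.items.foldl (fun acc pr =>
      let sorted_phrases := PySem.List.sorted2 pr.2 (fun p => -(pvWords p)) (fun p => p)
      let kept : PySem.Set String :=
        sorted_phrases.foldl (fun k p =>
          if k.any (fun longer => PySem.Str.isIn p longer && p != longer) then k
          else PySem.Set.add k p) PySem.Set.empty
      kept.foldl (fun acc2 p => acc2.modify p PySem.Set.empty (fun s => PySem.Set.add s pr.1)) acc)
      PySem.Dict.empty
  let collapsed : PySem.Dict String (PySem.Set String) :=
    longest.items.foldl (fun acc pr => acc.modify pr.1 PySem.Set.empty (fun s => PySem.Set.update s pr.2)) PySem.Dict.empty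
  collapsed.items

-- ===== PORT B =====
-- Python tuple comparison a < b on the sort keys (-len(p.split()), p)
def pvPairLt (a b : Int × String) : Bool :=
  decide (a.1 < b.1) || (decide (a.1 = b.1) && decide (a.2 < b.2))

def prune_subphrases_by_tinyid_alt (phrase_map : List (String × List String)) : List (String × List String) :=
  let tid_phrases : PySem.Dict String (List String) :=
    phrase_map.foldl (fun d pr => pr.2.foldl (fun d tid => d.modify tid [] (fun l => l ++ [pr.1])) d) PySem.Dict.empty
  let collapsed : PySem.Dict String (PySem.Set String) :=
    tid_phrases.items.foldl (fun acc pr =>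
      let keyed := pr.2.map (fun q => ((-(pvWords q), q), q))
      (PySem.List.sorted2 pr.2 (fun p => -(pvWords p)) (fun p => p)).foldl (fun acc2 p =>
        let kp := (-(pvWords p), p)
        if keyed.any (fun t => pvPairLt t.1 kp && PySem.Str.isIn p t.2) then acc2
        else acc2.modify p PySem.Set.empty (fun s => PySem.Set.add s pr.1)) acc)
      PySem.Dict.empty
  collapsed.items

-- ===== PRECONDITION & SPEC =====
-- Pre_ only requires phrase_map to be a canonical encoding of A's parameter type
-- dict[str, set[str]]: distinct keys and distinct ids inside each value; association
-- lists with duplicates encode no dict/set input the Python function can receive.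
def Pre_prune_subphrases_by_tinyid (phrase_map : List (String × List String)) : Prop :=
  (phrase_map.map Prod.fst).Nodup ∧ ∀ pr ∈ phrase_map, pr.2.Nodup
instance (phrase_map : List (String × List String)) : Decidable (Pre_prune_subphrases_by_tinyid phrase_map) := by
  unfold Pre_prune_subphrases_by_tinyid; infer_instance

def pvWitness_prune_subphrases_by_tinyid : (List (String × List String)) :=
  [("a b", ["t1"]), ("a", ["t1", "t2"])]

def Spec_prune_subphrases_by_tinyid (phrase_map : List (String × List String)) (out : List (String × List String)) : Prop := out = prune_subphrases_by_tinyid_alt phrase_map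
instance (phrase_map : List (String × List String)) (out : List (String × List String)) : Decidable (Spec_prune_subphrases_by_tinyid phrase_map out) := by unfold Spec_prune_subphrases_by_tinyid; infer_instance

-- ===== CLAIM (what is proved, stated in full; the proofs are below) =====
def Claim_equal_prune_subphrases_by_tinyid : Prop := ∀ (phrase_map : List (String × List String)), Dom_prune_subphrases_by_tinyid phrase_map → Pre_prune_subphrases_by_tinyid phrase_map → Spec_prune_subphrases_by_tinyid phrase_map (prune_subphrases_by_tinyid phrase_map)

-- ===== LEMMAS AND PROOFS =====

-- the tuple comparison specialised to two phrases' sort keys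
def pvKeyLt (q p : String) : Bool :=
  pvPairLt (-(pvWords q), q) (-(pvWords p), p)

-- the lexicographic sort key of both programs, as a value of a linear order
def pvKeyL (p : String) : Lex (Int × String) := toLex (-(pvWords p), p)

-- B's per-tinyID filter condition
def pvCond (phrases : List String) (p : String) : Bool :=
  phrases.any (fun q => PySem.Str.isIn p q && pvKeyLt q p)

lemma sorted2_eq_sorted_keyL (xs : List String) :
    PySem.List.sorted2 xs (fun p => -(pvWords p)) (fun p => p) = PySem.List.sorted xs pvKeyL := by
  unfold PySem.List.sorted2 PySem.List.sorted
  simp only [Bool.false_eq_true, if_false]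
  congr 1
  funext acc x
  congr 1
  funext a b
  simp only [pvKeyL, Prod.Lex.lt_iff, ofLex_toLex]
  rcases lt_trichotomy (-(pvWords a)) (-(pvWords b)) with h | h | h
  · simp [h, not_lt.mpr (le_of_lt h)]
  · simp [h]
  · simp [h, not_lt_of_gt h, ne_of_gt h]

lemma pvKeyLt_iff (q p : String) : pvKeyLt q p = true ↔ pvKeyL q < pvKeyL p := by
  simp [pvKeyLt, pvPairLt, pvKeyL, Prod.Lex.lt_iff]

lemma pvKeyL_inj : Function.Injective pvKeyL := by
  intro a b h
  simpa using congrArg (fun x => (ofLex x).2) h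

lemma pvIsIn_trans {a b c : String} (h1 : PySem.Str.isIn a b = true) (h2 : PySem.Str.isIn b c = true) :
    PySem.Str.isIn a c = true := by
  rw [PySem.Str.isIn_eq, PySem.Chars.isIn_iff_infix] at *
  exact h1.trans h2

lemma test_eq (phrases pre suf : List String) (p : String)
    (hs : PySem.List.sorted phrases pvKeyL = pre ++ p :: suf) (hnd : phrases.Nodup) :
    (pre.filter (fun x => !pvCond phrases x)).any (fun q => PySem.Str.isIn p q && p != q)
      = pvCond phrases p := by
  have hperm : (PySem.List.sorted phrases pvKeyL).Perm phrases := PySem.List.sorted_perm _ _ _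
  have hpw : (pre ++ p :: suf).Pairwise (fun a b => pvKeyL a ≤ pvKeyL b) := by
    rw [← hs]; exact PySem.List.sorted_pairwise phrases pvKeyL
  have hpre_le : ∀ q ∈ pre, pvKeyL q ≤ pvKeyL p := by
    intro q hq
    exact (List.pairwise_append.mp hpw).2.2 q hq p (List.mem_cons_self ..)
  have hsuf_ge : ∀ r ∈ suf, pvKeyL p ≤ pvKeyL r := by
    intro r hr
    exact (List.pairwise_cons.mp (List.pairwise_append.mp hpw).2.1).1 r hr
  have hmem : ∀ q ∈ pre, q ∈ phrases := fun q hq =>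
    hperm.mem_iff.mp (by rw [hs]; exact List.mem_append_left _ hq)
  have hnds : (pre ++ p :: suf).Nodup := by
    rw [← hs]; exact (hperm.nodup_iff).mpr hnd
  rw [Bool.eq_iff_iff]
  simp only [List.any_eq_true, List.mem_filter, Bool.and_eq_true, bne_iff_ne, ne_eq, pvCond]
  constructor
  · rintro ⟨q, ⟨hqpre, hqc⟩, hin, hne⟩
    refine ⟨q, hmem q hqpre, hin, ?_⟩
    rw [pvKeyLt_iff]
    exact lt_of_le_of_ne (hpre_le q hqpre) (fun h => hne (pvKeyL_inj h).symm)
  · rintro ⟨q, hq, hin, hlt⟩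
    have hWne : phrases.filter (fun q => PySem.Str.isIn p q && pvKeyLt q p) ≠ [] := by
      intro h
      have hmemW : q ∈ phrases.filter (fun q => PySem.Str.isIn p q && pvKeyLt q p) := by
        rw [List.mem_filter, Bool.and_eq_true]; exact ⟨hq, hin, hlt⟩
      rw [h] at hmemW
      exact absurd hmemW List.not_mem_nil
    obtain ⟨q0, hq0⟩ : ∃ q0, (phrases.filter (fun q => PySem.Str.isIn p q && pvKeyLt q p)).argmin pvKeyL = some q0 := by
      cases hh : (phrases.filter (fun q => PySem.Str.isIn p q && pvKeyLt q p)).argmin pvKeyL with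
      | none => exact absurd (List.argmin_eq_none.mp hh) hWne
      | some a => exact ⟨a, rfl⟩
    have hq0m : q0 ∈ (phrases.filter (fun q => PySem.Str.isIn p q && pvKeyLt q p)).argmin pvKeyL := hq0
    have hq0W := List.argmin_mem hq0m
    have hq0min : ∀ r ∈ phrases.filter (fun q => PySem.Str.isIn p q && pvKeyLt q p), pvKeyL q0 ≤ pvKeyL r :=
      fun r hr => List.le_of_mem_argmin hr hq0m
    rw [List.mem_filter, Bool.and_eq_true] at hq0W
    have hq0ph := hq0W.1
    have hq0in := hq0W.2.1
    have hq0lt := hq0W.2.2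
    rw [pvKeyLt_iff] at hq0lt
    have hC : (phrases.any fun q => PySem.Str.isIn q0 q && pvKeyLt q q0) = false := by
      rw [Bool.eq_false_iff]
      intro hCt
      simp only [List.any_eq_true, Bool.and_eq_true] at hCt
      obtain ⟨r, hrph, hrin, hrlt⟩ := hCt
      rw [pvKeyLt_iff] at hrlt
      have hrW : r ∈ phrases.filter (fun q => PySem.Str.isIn p q && pvKeyLt q p) := by
        rw [List.mem_filter, Bool.and_eq_true]
        exact ⟨hrph, pvIsIn_trans hq0in hrin, (pvKeyLt_iff r p).mpr (hrlt.trans hq0lt)⟩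
      exact absurd (hq0min r hrW) (not_le_of_gt hrlt)
    have hq0s : q0 ∈ pre ++ p :: suf := by
      rw [← hs]; exact hperm.mem_iff.mpr hq0ph
    have hq0ne : q0 ≠ p := fun h => absurd hq0lt (by rw [h]; exact lt_irrefl _)
    have hq0pre : q0 ∈ pre := by
      rcases List.mem_append.mp hq0s with h | h
      · exact h
      · rcases List.mem_cons.mp h with h | h
        · exact absurd h hq0ne
        · exact absurd (hsuf_ge q0 h) (not_le_of_gt hq0lt)
    exact ⟨q0, ⟨hq0pre, by rw [hC]; rfl⟩, hq0in, fun h => hq0ne (h ▸ rfl)⟩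

lemma kept_fold_aux (phrases : List String) (hnd : phrases.Nodup) :
    ∀ (rest pre : List String), PySem.List.sorted phrases pvKeyL = pre ++ rest →
      rest.foldl (fun k p => if k.any (fun longer => PySem.Str.isIn p longer && p != longer) then k
                             else PySem.Set.add k p) (pre.filter (fun x => !pvCond phrases x))
        = (pre ++ rest).filter (fun x => !pvCond phrases x) := by
  intro rest
  induction rest with
  | nil => intro pre h; simp
  | cons p rest ih =>
    intro pre h
    rw [List.foldl_cons, test_eq phrases pre rest p h hnd]
    have h' : PySem.List.sorted phrases pvKeyL = (pre ++ [p]) ++ rest := by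
      rw [h, List.append_assoc]; rfl
    have hnds : (pre ++ p :: rest).Nodup := by
      rw [← h]; exact ((PySem.List.sorted_perm _ _ _).nodup_iff).mpr hnd
    cases hC : pvCond phrases p with
    | true =>
      have hfil : (pre ++ [p]).filter (fun x => !pvCond phrases x) = pre.filter (fun x => !pvCond phrases x) := by
        rw [List.filter_append]; simp [hC]
      rw [if_pos rfl]
      calc (rest.foldl _ (pre.filter (fun x => !pvCond phrases x)))
          = rest.foldl _ ((pre ++ [p]).filter (fun x => !pvCond phrases x)) := by rw [hfil]
        _ = ((pre ++ [p]) ++ rest).filter (fun x => !pvCond phrases x) := ih (pre ++ [p]) h'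
        _ = (pre ++ p :: rest).filter (fun x => !pvCond phrases x) := by rw [List.append_assoc]; rfl
    | false =>
      have hpnot : p ∉ pre := by
        have := (List.nodup_append.mp hnds).2.2
        intro hp
        exact this p hp p List.mem_cons_self rfl
      have hpnotf : p ∉ pre.filter (fun x => !pvCond phrases x) :=
        fun hp => hpnot (List.mem_of_mem_filter hp)
      have hadd : PySem.Set.add (pre.filter (fun x => !pvCond phrases x)) p
          = (pre ++ [p]).filter (fun x => !pvCond phrases x) := by
        rw [List.filter_append]
        simp [PySem.Set.add, List.contains_eq_mem, hpnotf, hC]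
      rw [if_neg (by simp), hadd]
      calc (rest.foldl _ ((pre ++ [p]).filter (fun x => !pvCond phrases x)))
          = ((pre ++ [p]) ++ rest).filter (fun x => !pvCond phrases x) := ih (pre ++ [p]) h'
        _ = (pre ++ p :: rest).filter (fun x => !pvCond phrases x) := by rw [List.append_assoc]; rfl

lemma kept_eq_filter (phrases : List String) (hnd : phrases.Nodup) :
    (PySem.List.sorted phrases pvKeyL).foldl
        (fun k p => if k.any (fun longer => PySem.Str.isIn p longer && p != longer) then k
                    else PySem.Set.add k p) PySem.Set.empty
      = (PySem.List.sorted phrases pvKeyL).filter (fun x => !pvCond phrases x) := by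
  have := kept_fold_aux phrases hnd (PySem.List.sorted phrases pvKeyL) [] rfl
  simpa [PySem.Set.empty] using this

lemma tid_step (acc : PySem.Dict String (PySem.Set String)) (tid : String)
    (phrases : List String) (hnd : phrases.Nodup) :
    (let sorted_phrases := PySem.List.sorted2 phrases (fun p => -(pvWords p)) (fun p => p)
     let kept : PySem.Set String :=
        sorted_phrases.foldl (fun k p =>
          if k.any (fun longer => PySem.Str.isIn p longer && p != longer) then k
          else PySem.Set.add k p) PySem.Set.empty
     kept.foldl (fun acc2 p => acc2.modify p PySem.Set.empty (fun s => PySem.Set.add s tid)) acc)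
    = (PySem.List.sorted2 phrases (fun p => -(pvWords p)) (fun p => p)).foldl (fun acc2 p =>
        if (phrases.map (fun q => ((-(pvWords q), q), q))).any
             (fun t => pvPairLt t.1 (-(pvWords p), p) && PySem.Str.isIn p t.2) then acc2
        else acc2.modify p PySem.Set.empty (fun s => PySem.Set.add s tid)) acc := by
  dsimp only
  rw [sorted2_eq_sorted_keyL, kept_eq_filter phrases hnd, List.foldl_filter]
  apply PySem.List.foldl_congr_mem
  intro acc2 x _
  have hcond : ((phrases.map (fun q => ((-(pvWords q), q), q))).any
      (fun t => pvPairLt t.1 (-(pvWords x), x) && PySem.Str.isIn x t.2)) = pvCond phrases x := by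
    rw [List.any_map]
    show (phrases.any fun q => pvKeyLt q x && PySem.Str.isIn x q) = pvCond phrases x
    have hfl : (fun q => pvKeyLt q x && PySem.Str.isIn x q)
        = (fun q => PySem.Str.isIn x q && pvKeyLt q x) := funext fun q => Bool.and_comm _ _
    rw [hfl]; rfl
  rw [hcond]
  cases hC : pvCond phrases x <;> simp

lemma group_getD (pm : List (String × List String)) (hv : ∀ pr ∈ pm, pr.2.Nodup)
    (d : PySem.Dict String (List String)) (tid : String) :
    (pm.foldl (fun d pr => pr.2.foldl (fun d t => d.modify t [] (fun l => l ++ [pr.1])) d) d).getD tid []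
      = d.getD tid [] ++ (pm.filter (fun pr => pr.2.contains tid)).map Prod.fst := by
  induction pm generalizing d with
  | nil => simp
  | cons pr pm ih =>
    rw [List.foldl_cons]
    rw [ih (fun q hq => hv q (List.mem_cons_of_mem _ hq))]
    have hinner : (pr.2.foldl (fun d t => d.modify t [] (fun l => l ++ [pr.1])) d)
        = (pr.2.map (fun t => (t, pr.1))).foldl (fun d p => d.modify p.1 [] (fun l => l ++ [p.2])) d := by
      rw [List.foldl_map]
    rw [hinner, PySem.Dict.getD_foldl_modify_append]
    have hfil : ((pr.2.map (fun t => (t, pr.1))).filter (fun p => p.1 == tid)).map (fun x => x.2)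
        = if pr.2.contains tid then [pr.1] else [] := by
      rw [List.filter_map]
      have : ((fun p => p.1 == tid) ∘ (fun t => (t, pr.1))) = fun t => t == tid := by funext t; rfl
      rw [this, List.filter_beq, List.map_map]
      by_cases hm : tid ∈ pr.2
      · rw [List.count_eq_one_of_mem (hv pr (List.mem_cons_self)) hm]
        simp [List.contains_eq_mem, hm]
      · rw [List.count_eq_zero.mpr hm]
        simp [List.contains_eq_mem, hm]
    rw [hfil]
    by_cases hm : tid ∈ pr.2 <;>
      simp [List.contains_eq_mem, hm, List.append_assoc]

lemma group_nodup_keys (pm : List (String × List String)) (d : PySem.Dict String (List String))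
    (hd : d.keys.Nodup) :
    (pm.foldl (fun d pr => pr.2.foldl (fun d t => d.modify t [] (fun l => l ++ [pr.1])) d) d).keys.Nodup := by
  induction pm generalizing d with
  | nil => exact hd
  | cons pr pm ih =>
    rw [List.foldl_cons]
    exact ih _ (PySem.Dict.nodup_keys_foldl_modify_key pr.2 (fun t => t) [] (fun _ _ l => l ++ [pr.1]) d hd)

lemma group_items_nodup (pm : List (String × List String))
    (hk : (pm.map Prod.fst).Nodup) (hv : ∀ pr ∈ pm, pr.2.Nodup)
    (pr : String × List String)
    (hmem : pr ∈ (pm.foldl (fun d pr => pr.2.foldl (fun d t => d.modify t [] (fun l => l ++ [pr.1])) d) PySem.Dict.empty).items) :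
    pr.2.Nodup := by
  have hnd := group_nodup_keys pm PySem.Dict.empty PySem.Dict.nodup_keys_empty
  obtain ⟨t, v⟩ := pr
  have hget := PySem.Dict.getD_of_mem_items _ hmem hnd []
  rw [group_getD pm hv PySem.Dict.empty t, PySem.Dict.getD_empty, List.nil_append] at hget
  rw [← hget]
  exact hk.sublist (List.Sublist.map Prod.fst List.filter_sublist)

lemma getD_values_cases (d : PySem.Dict String (PySem.Set String)) (p : String) :
    d.getD p PySem.Set.empty = PySem.Set.empty ∨ d.getD p PySem.Set.empty ∈ d.values := by
  rw [PySem.Dict.getD_eq_get?_getD]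
  cases hg : d.get? p with
  | none => left; rfl
  | some w =>
    right
    have hmem := PySem.Dict.mem_items_of_get?_eq_some d hg
    have hmem2 : w ∈ d.items.map (fun pr => pr.2) := List.mem_map_of_mem (f := fun pr => pr.2) hmem
    simpa [PySem.Dict.values] using hmem2

lemma write1_nodup (tid : String) (ps : List String) (d : PySem.Dict String (PySem.Set String))
    (hk : d.keys.Nodup) (hv : ∀ v ∈ d.values, v.Nodup) :
    (ps.foldl (fun acc2 p => acc2.modify p PySem.Set.empty (fun s => PySem.Set.add s tid)) d).keys.Nodup
    ∧ ∀ v ∈ (ps.foldl (fun acc2 p => acc2.modify p PySem.Set.empty (fun s => PySem.Set.add s tid)) d).values, v.Nodup := by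
  induction ps generalizing d with
  | nil => exact ⟨hk, hv⟩
  | cons p ps ih =>
    rw [List.foldl_cons]
    apply ih
    · show (d.insert p _).keys.Nodup
      exact PySem.Dict.nodup_keys_insert d _ _ hk
    · intro v hvm
      rcases PySem.Dict.mem_values_insert d _ _ _ hvm with h | h
      · subst h
        apply PySem.Set.nodup_add
        rcases getD_values_cases d p with h2 | h2
        · rw [h2]; exact List.nodup_nil
        · exact hv _ h2
      · exact hv v h

lemma write_nodup (l : List (String × List String)) (F : String → List String → List String)
    (d : PySem.Dict String (PySem.Set String)) (hk : d.keys.Nodup)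
    (hv : ∀ v ∈ d.values, v.Nodup) :
    (l.foldl (fun acc pr => (F pr.1 pr.2).foldl
        (fun acc2 p => acc2.modify p PySem.Set.empty (fun s => PySem.Set.add s pr.1)) acc) d).keys.Nodup
    ∧ ∀ v ∈ (l.foldl (fun acc pr => (F pr.1 pr.2).foldl
        (fun acc2 p => acc2.modify p PySem.Set.empty (fun s => PySem.Set.add s pr.1)) acc) d).values, v.Nodup := by
  induction l generalizing d with
  | nil => exact ⟨hk, hv⟩
  | cons pr l ih =>
    rw [List.foldl_cons]
    obtain ⟨h1, h2⟩ := write1_nodup pr.1 (F pr.1 pr.2) d hk hv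
    exact ih _ h1 h2

lemma rebuild_aux (l : List (String × PySem.Set String)) :
    ∀ (d0 : PySem.Dict String (PySem.Set String)),
      (∀ pr ∈ l, d0.contains pr.1 = false) → (l.map Prod.fst).Nodup → (∀ pr ∈ l, pr.2.Nodup) →
      (l.foldl (fun acc pr => acc.modify pr.1 PySem.Set.empty (fun s => PySem.Set.update s pr.2)) d0).items
        = d0.items ++ l := by
  induction l with
  | nil => intro d0 _ _ _; simp
  | cons pr l ih =>
    intro d0 hc hk hv
    rw [List.foldl_cons]
    have hc0 : d0.contains pr.1 = false := hc pr List.mem_cons_self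
    have hstep : d0.modify pr.1 PySem.Set.empty (fun s => PySem.Set.update s pr.2)
        = d0.insert pr.1 pr.2 := by
      show d0.insert pr.1 (PySem.Set.update (d0.getD pr.1 PySem.Set.empty) pr.2) = _
      rw [PySem.Dict.getD_of_not_contains d0 _ hc0]
      congr 1
      show PySem.Set.update [] pr.2 = pr.2
      rw [show PySem.Set.update [] pr.2 = PySem.Set.ofList pr.2 from (PySem.Set.ofList_eq_foldl pr.2).symm]
      exact PySem.Set.ofList_eq_self_of_nodup pr.2 (hv pr List.mem_cons_self)
    rw [hstep]
    have hcl : ∀ q ∈ l, (d0.insert pr.1 pr.2).contains q.1 = false := by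
      intro q hq
      rw [PySem.Dict.contains_insert]
      have hne : q.1 ≠ pr.1 := by
        intro h
        have := (List.nodup_cons.mp hk).1
        exact this (h ▸ List.mem_map_of_mem hq)
      simp [hne, hc q (List.mem_cons_of_mem _ hq)]
    rw [ih _ hcl (List.nodup_cons.mp hk).2 (fun q hq => hv q (List.mem_cons_of_mem _ hq))]
    rw [PySem.Dict.items_insert_of_not_contains d0 _ hc0]
    simp

lemma rebuild_eq (d : PySem.Dict String (PySem.Set String)) (hk : d.keys.Nodup)
    (hv : ∀ v ∈ d.values, v.Nodup) :
    d.items.foldl (fun acc pr => acc.modify pr.1 PySem.Set.empty (fun s => PySem.Set.update s pr.2)) PySem.Dict.empty = d := by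
  apply PySem.Dict.ext
  rw [rebuild_aux d.items PySem.Dict.empty (fun pr _ => PySem.Dict.contains_empty pr.1) hk
      (fun pr hpr => hv pr.2 (by
        have h2 : pr.2 ∈ d.items.map (fun q => q.2) := List.mem_map_of_mem (f := fun q => q.2) hpr
        simpa [PySem.Dict.values] using h2))]
  simp [PySem.Dict.empty]

-- the two ports agree on every canonical input
lemma pv_ports_eq (pm : List (String × List String))
    (hk : (pm.map Prod.fst).Nodup) (hv : ∀ pr ∈ pm, pr.2.Nodup) :
    prune_subphrases_by_tinyid pm = prune_subphrases_by_tinyid_alt pm := by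
  have hG : ∀ pr ∈ (pm.foldl (fun d pr => pr.2.foldl (fun d t => d.modify t [] (fun l => l ++ [pr.1])) d) PySem.Dict.empty).items, pr.2.Nodup :=
    group_items_nodup pm hk hv
  have hlong :
      ((pm.foldl (fun d pr => pr.2.foldl (fun d tid => d.modify tid [] (fun l => l ++ [pr.1])) d) PySem.Dict.empty).items.foldl
        (fun acc pr =>
          ((PySem.List.sorted2 pr.2 (fun p => -(pvWords p)) (fun p => p)).foldl
              (fun k p => if k.any (fun longer => PySem.Str.isIn p longer && p != longer) then k else PySem.Set.add k p)
              PySem.Set.empty).foldl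
            (fun acc2 p => acc2.modify p PySem.Set.empty (fun s => PySem.Set.add s pr.1)) acc)
        PySem.Dict.empty)
      = ((pm.foldl (fun d pr => pr.2.foldl (fun d tid => d.modify tid [] (fun l => l ++ [pr.1])) d) PySem.Dict.empty).items.foldl
        (fun acc pr =>
          (PySem.List.sorted2 pr.2 (fun p => -(pvWords p)) (fun p => p)).foldl (fun acc2 p =>
            if (pr.2.map (fun q => ((-(pvWords q), q), q))).any
                 (fun t => pvPairLt t.1 (-(pvWords p), p) && PySem.Str.isIn p t.2) then acc2
            else acc2.modify p PySem.Set.empty (fun s => PySem.Set.add s pr.1)) acc)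
        PySem.Dict.empty) :=
    PySem.List.foldl_congr_mem _ _ _ _ (fun acc pr hpr => tid_step acc pr.1 pr.2 (hG pr hpr))
  obtain ⟨hkeys, hvals⟩ := write_nodup
    (pm.foldl (fun d pr => pr.2.foldl (fun d tid => d.modify tid [] (fun l => l ++ [pr.1])) d) PySem.Dict.empty).items
    (fun _ phrases =>
      (PySem.List.sorted2 phrases (fun p => -(pvWords p)) (fun p => p)).foldl
        (fun k p => if k.any (fun longer => PySem.Str.isIn p longer && p != longer) then k else PySem.Set.add k p)
        PySem.Set.empty)
    PySem.Dict.empty PySem.Dict.nodup_keys_empty (by intro v hvm; simp [PySem.Dict.empty, PySem.Dict.values] at hvm)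
  show (((pm.foldl (fun d pr => pr.2.foldl (fun d tid => d.modify tid [] (fun l => l ++ [pr.1])) d) PySem.Dict.empty).items.foldl
        (fun acc pr =>
          ((PySem.List.sorted2 pr.2 (fun p => -(pvWords p)) (fun p => p)).foldl
              (fun k p => if k.any (fun longer => PySem.Str.isIn p longer && p != longer) then k else PySem.Set.add k p)
              PySem.Set.empty).foldl
            (fun acc2 p => acc2.modify p PySem.Set.empty (fun s => PySem.Set.add s pr.1)) acc)
        PySem.Dict.empty).items.foldl
      (fun acc pr => acc.modify pr.1 PySem.Set.empty (fun s => PySem.Set.update s pr.2)) PySem.Dict.empty).items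
    = ((pm.foldl (fun d pr => pr.2.foldl (fun d tid => d.modify tid [] (fun l => l ++ [pr.1])) d) PySem.Dict.empty).items.foldl
        (fun acc pr =>
          (PySem.List.sorted2 pr.2 (fun p => -(pvWords p)) (fun p => p)).foldl (fun acc2 p =>
            if (pr.2.map (fun q => ((-(pvWords q), q), q))).any
                 (fun t => pvPairLt t.1 (-(pvWords p), p) && PySem.Str.isIn p t.2) then acc2
            else acc2.modify p PySem.Set.empty (fun s => PySem.Set.add s pr.1)) acc)
        PySem.Dict.empty).items
  rw [← hlong, rebuild_eq _ hkeys hvals]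

-- ===== VERDICT (by name: the statement is the Claim_ definition above) =====
theorem prune_subphrases_by_tinyid_spec : Claim_equal_prune_subphrases_by_tinyid := by
  intro phrase_map _ hpre
  exact pv_ports_eq phrase_map hpre.1 hpre.2
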